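-- pv_equiv track=rewrite | github.com/Stephen-ODriscoll/2019_MachineLearning | Assignment3/main.py | num_coefficients_3
-- ===== SOURCE A (Python) =====
-- def num_coefficients_3(d):
--     t = 0
--     for n in range(d + 1):
--         for i in range(n + 1):
--             for j in range(n + 1):
--                 for k in range(n + 1):
--                     if i + j + k == n:
--                         t += 1
--     return t
-- ===== SOURCE B (Python) =====
-- def num_coefficients_3(d):
--     if d < 0:
--         return 0
--     return (d + 1) * (d + 2) * (d + 3) // 6
-- ===== Notes on version B (the rewrite author's own statement) =====
-- stated objective: faster
-- what changed: Replaces the quadruple nested loop that enumerates all (n,i,j,k) tuples with the closed-form binomial C(d+3,3) = (d+1)(d+2)(d+3)//6 (and 0 for negative d, where the loop is empty).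
import Mathlib
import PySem

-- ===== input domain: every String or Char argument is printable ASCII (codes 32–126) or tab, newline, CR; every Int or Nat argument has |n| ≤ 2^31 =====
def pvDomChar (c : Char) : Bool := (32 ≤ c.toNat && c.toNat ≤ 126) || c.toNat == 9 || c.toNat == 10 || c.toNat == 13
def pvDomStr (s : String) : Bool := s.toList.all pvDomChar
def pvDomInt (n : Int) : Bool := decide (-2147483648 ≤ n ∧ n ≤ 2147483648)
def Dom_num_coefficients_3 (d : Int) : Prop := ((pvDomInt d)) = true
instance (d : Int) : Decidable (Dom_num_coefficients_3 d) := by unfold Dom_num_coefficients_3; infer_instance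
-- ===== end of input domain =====

-- B replaces A's quadruple nested counting loop with the closed form C(d+3,3) = (d+1)(d+2)(d+3)//6 (0 for d < 0): faster (O(1) vs O(d^4)).

-- ===== PORT A =====
def num_coefficients_3 (d : Int) : Int :=
  (PySem.List.pyRange 0 (d + 1) 1).foldl (fun t n =>
    (PySem.List.pyRange 0 (n + 1) 1).foldl (fun t i =>
      (PySem.List.pyRange 0 (n + 1) 1).foldl (fun t j =>
        (PySem.List.pyRange 0 (n + 1) 1).foldl (fun t k =>
          if i + j + k = n then t + 1 else t) t) t) t) 0

-- ===== PORT B =====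
def num_coefficients_3_alt (d : Int) : Int :=
  if d < 0 then 0 else PySem.Int.floordiv ((d + 1) * (d + 2) * (d + 3)) 6

-- ===== PRECONDITION & SPEC =====
def Spec_num_coefficients_3 (d : Int) (out : Int) : Prop := out = num_coefficients_3_alt d
instance (d : Int) (out : Int) : Decidable (Spec_num_coefficients_3 d out) := by unfold Spec_num_coefficients_3; infer_instance

-- ===== CLAIM (what is proved, stated in full; the proofs are below) =====
def Claim_equal_num_coefficients_3 : Prop := ∀ (d : Int), Dom_num_coefficients_3 d → Spec_num_coefficients_3 d (num_coefficients_3 d)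

-- ===== LEMMAS AND PROOFS =====

-- count of elements equal to x in range [a, b)
theorem pv_countP_eq (a b x : Int) :
    ((PySem.List.pyRange a b 1).countP (fun k => k == x) : Int)
      = if a ≤ x ∧ x < b then 1 else 0 := by
  have hc : (PySem.List.pyRange a b 1).countP (fun k => k == x)
      = (PySem.List.pyRange a b 1).count x := rfl
  by_cases h : a ≤ x ∧ x < b
  · rw [hc, List.count_eq_one_of_mem (PySem.List.nodup_pyRange_one a b)
      ((PySem.List.mem_pyRange_one).mpr h)]
    simp [h]
  · rw [hc, List.count_eq_zero.mpr (fun hm => h ((PySem.List.mem_pyRange_one).mp hm))]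
    simp [h]

-- count of elements below c in range [0, b)
theorem pv_countP_lt (b c : Int) (h0 : 0 ≤ c) (hcb : c ≤ b) :
    (((PySem.List.pyRange 0 b 1).countP (fun j => decide (j < c))) : Int) = c := by
  rw [PySem.List.pyRange_one_append 0 c b h0 hcb, List.countP_append]
  have h1 : (PySem.List.pyRange 0 c 1).countP (fun j => decide (j < c))
      = (PySem.List.pyRange 0 c 1).length :=
    List.countP_eq_length.mpr (fun j hj => by
      have := (PySem.List.mem_pyRange_one).mp hj; simp; omega)
  have h2 : (PySem.List.pyRange c b 1).countP (fun j => decide (j < c)) = 0 :=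
    List.countP_eq_zero.mpr (fun j hj => by
      have := (PySem.List.mem_pyRange_one).mp hj; simp; omega)
  rw [h1, h2, PySem.List.length_pyRange_one]
  omega

-- innermost k-loop
theorem pv_kloop (n i j t : Int) (hi : 0 ≤ i) (hj : 0 ≤ j) :
    (PySem.List.pyRange 0 (n + 1) 1).foldl
      (fun t k => if i + j + k = n then t + 1 else t) t
      = if i + j ≤ n then t + 1 else t := by
  have h := PySem.List.foldl_ite_add_one (l := PySem.List.pyRange 0 (n + 1) 1)
    (p := fun k => i + j + k = n) (a := t)
  rw [h]
  have hp : (fun k => decide (i + j + k = n)) = (fun k : Int => k == (n - i - j)) := by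
    funext k
    by_cases hk : i + j + k = n
    · simp [show k = n - i - j by omega]
    · simp [hk, show k ≠ n - i - j by omega]
  rw [hp, pv_countP_eq]
  by_cases hle : i + j ≤ n
  · rw [if_pos (by omega), if_pos hle]
  · rw [if_neg (by omega), if_neg hle]; ring

-- j-loop
theorem pv_jloop (n i t : Int) (hi : 0 ≤ i) (hin : i < n + 1) :
    (PySem.List.pyRange 0 (n + 1) 1).foldl
      (fun t j =>
        (PySem.List.pyRange 0 (n + 1) 1).foldl
          (fun t k => if i + j + k = n then t + 1 else t) t) t
      = t + (n - i + 1) := by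
  rw [PySem.List.foldl_congr_mem _ _ (fun t j => if i + j ≤ n then t + 1 else t) t
    (fun t j hjm => pv_kloop n i j t hi ((PySem.List.mem_pyRange_one).mp hjm).1)]
  rw [PySem.List.foldl_ite_add_one]
  have hp : (fun j : Int => decide (i + j ≤ n)) = (fun j : Int => decide (j < n - i + 1)) := by
    funext j; simp only [decide_eq_decide]; omega
  rw [hp, pv_countP_lt (n + 1) (n - i + 1) (by omega) (by omega)]

-- i-loop
theorem pv_iloop (n t : Int) :
    (PySem.List.pyRange 0 (n + 1) 1).foldl
      (fun t i =>
        (PySem.List.pyRange 0 (n + 1) 1).foldl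
          (fun t j =>
            (PySem.List.pyRange 0 (n + 1) 1).foldl
              (fun t k => if i + j + k = n then t + 1 else t) t) t) t
      = t + ((PySem.List.pyRange 0 (n + 1) 1).map (fun i => n - i + 1)).sum := by
  rw [PySem.List.foldl_congr_mem _ _ (fun t i => t + (n - i + 1)) t
    (fun t i him => pv_jloop n i t ((PySem.List.mem_pyRange_one).mp him).1
      ((PySem.List.mem_pyRange_one).mp him).2)]
  rw [PySem.List.foldl_add]

-- closed form for the triangular sum of one shell, stated multiplicatively
theorem pv_shell (m : Nat) :
    2 * (((PySem.List.pyRange 0 ((m : Int)) 1).map (fun i => (m : Int) - 1 - i + 1)).sum)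
      = (m : Int) * ((m : Int) + 1) := by
  induction m with
  | zero => simp [PySem.List.pyRange_one_eq_nil]
  | succ k ih =>
    have hsplit : PySem.List.pyRange 0 ((k + 1 : Nat) : Int) 1
        = PySem.List.pyRange 0 (k : Int) 1 ++ [(k : Int)] := by
      have : ((k + 1 : Nat) : Int) = (k : Int) + 1 := by push_cast; ring
      rw [this, PySem.List.pyRange_one_succ_right (by positivity)]
    rw [hsplit, List.map_append, List.sum_append]
    have hmap : (PySem.List.pyRange 0 (k : Int) 1).map
        (fun i => ((k + 1 : Nat) : Int) - 1 - i + 1)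
        = (PySem.List.pyRange 0 (k : Int) 1).map (fun i => ((k : Int) - 1 - i + 1) + 1) := by
      apply List.map_congr_left; intro x _; push_cast; ring
    rw [hmap]
    have hadd : ((PySem.List.pyRange 0 (k : Int) 1).map
        (fun i => ((k : Int) - 1 - i + 1) + 1)).sum
        = ((PySem.List.pyRange 0 (k : Int) 1).map (fun i => (k : Int) - 1 - i + 1)).sum
          + (k : Int) := by
      rw [PySem.List.sum_map_add_int (f := fun i => (k : Int) - 1 - i + 1) (g := fun _ => 1),
        PySem.List.sum_map_const_int, PySem.List.length_pyRange_one]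
      omega
    rw [hadd]
    push_cast
    simp only [List.map_cons, List.map_nil, List.sum_cons, List.sum_nil]
    linarith [ih]

-- the whole sum over shells n = 0 .. m-1
theorem pv_total (m : Nat) :
    6 * (((PySem.List.pyRange 0 ((m : Int)) 1).map
        (fun n => ((PySem.List.pyRange 0 (n + 1) 1).map (fun i => n - i + 1)).sum)).sum)
      = (m : Int) * ((m : Int) + 1) * ((m : Int) + 2) := by
  induction m with
  | zero => simp [PySem.List.pyRange_one_eq_nil]
  | succ k ih =>
    have hsplit : PySem.List.pyRange 0 ((k + 1 : Nat) : Int) 1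
        = PySem.List.pyRange 0 (k : Int) 1 ++ [(k : Int)] := by
      have : ((k + 1 : Nat) : Int) = (k : Int) + 1 := by push_cast; ring
      rw [this, PySem.List.pyRange_one_succ_right (by positivity)]
    rw [hsplit, List.map_append, List.sum_append]
    simp only [List.map_cons, List.map_nil, List.sum_cons, List.sum_nil]
    have hshell := pv_shell (k + 1)
    have hcast : ((k + 1 : Nat) : Int) = (k : Int) + 1 := by push_cast; ring
    rw [hcast] at hshell
    have hmap : (PySem.List.pyRange 0 ((k : Int) + 1) 1).map
        (fun i => ((k : Int) + 1) - 1 - i + 1)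
        = (PySem.List.pyRange 0 ((k : Int) + 1) 1).map (fun i => (k : Int) - i + 1) := by
      apply List.map_congr_left; intro x _; ring
    rw [hmap] at hshell
    push_cast
    linarith [ih, hshell]

-- ===== VERDICT (by name: the statement is the Claim_ definition above) =====
theorem num_coefficients_3_spec : Claim_equal_num_coefficients_3 := by
  intro d _
  unfold Spec_num_coefficients_3 num_coefficients_3 num_coefficients_3_alt
  by_cases hd : d < 0
  · rw [if_pos hd, PySem.List.pyRange_one_eq_nil (by omega)]
    rfl
  · rw [if_neg hd]
    have hm : ∃ m : Nat, (m : Int) = d + 1 := ⟨(d + 1).toNat, by omega⟩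
    obtain ⟨m, hmeq⟩ := hm
    have hA : (PySem.List.pyRange 0 (d + 1) 1).foldl (fun t n =>
        (PySem.List.pyRange 0 (n + 1) 1).foldl (fun t i =>
          (PySem.List.pyRange 0 (n + 1) 1).foldl (fun t j =>
            (PySem.List.pyRange 0 (n + 1) 1).foldl (fun t k =>
              if i + j + k = n then t + 1 else t) t) t) t) 0
        = ((PySem.List.pyRange 0 (d + 1) 1).map
            (fun n => ((PySem.List.pyRange 0 (n + 1) 1).map (fun i => n - i + 1)).sum)).sum := by
      rw [PySem.List.foldl_congr_mem _ _
        (fun t n => t + ((PySem.List.pyRange 0 (n + 1) 1).map (fun i => n - i + 1)).sum) 0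
        (fun t n _ => pv_iloop n t)]
      rw [PySem.List.foldl_add]
      ring
    rw [hA]
    have htot := pv_total m
    rw [hmeq] at htot
    have h6 : 6 * (((PySem.List.pyRange 0 (d + 1) 1).map
        (fun n => ((PySem.List.pyRange 0 (n + 1) 1).map (fun i => n - i + 1)).sum)).sum)
        = (d + 1) * (d + 2) * (d + 3) := by rw [htot]; ring
    rw [PySem.Int.floordiv_eq_ediv_of_pos (by omega)]
    omega
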